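-- pv_equiv track=rewrite | github.com/Metta-AI/metta | mettagrid/config/room/utils.py | compute_positions
-- ===== SOURCE A (Python) =====
-- from typing import List, Tuple, Dict, Optional, Set
--
-- def compute_positions(start: int, end: int, blocks: List[Tuple[str, int]]) -> Dict[str, int]:
--     """
--     Given a starting and ending coordinate along an axis and a list of blocks (name, width),
--     compute and return a dictionary mapping each block name to its starting coordinate.
--
--     This is useful for laying out consecutive blocks with evenly distributed gaps.
--     """
--     total_blocks = sum(width for _, width in blocks)
--     total_gap = (end - start) - total_blocks
--     num_gaps = len(blocks) - 1
--     base_gap = total_gap // num_gaps if num_gaps > 0 else 0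
--     extra = total_gap % num_gaps if num_gaps > 0 else 0
--
--     positions = {}
--     pos = start
--     for i, (name, width) in enumerate(blocks):
--         positions[name] = pos
--         pos += width
--         if i < len(blocks) - 1:
--             pos += base_gap + (1 if i < extra else 0)
--     return positions
-- ===== SOURCE B (Python) =====
-- def compute_positions(start: int, end: int, blocks):
--     """Closed-form layout: position of block i = start + prefix_width[i] + i*base_gap + min(i, extra)."""
--     n = len(blocks)
--     widths = [w for _, w in blocks]
--     total_gap = (end - start) - sum(widths)
--     if n > 1:
--         base_gap = total_gap // (n - 1)
--         extra = total_gap % (n - 1)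
--     else:
--         base_gap = 0
--         extra = 0
--     prefix = [0]
--     for w in widths:
--         prefix.append(prefix[-1] + w)
--     return {name: start + p + i * base_gap + min(i, extra)
--             for i, ((name, _), p) in enumerate(zip(blocks, prefix))}
-- ===== Notes on version B (the rewrite author's own statement) =====
-- stated objective: alternative
-- what changed: Replaced A's running position accumulator threaded through the loop (with a per-iteration gap conditional) by a prefix-sum array of widths and the closed form start + prefix[i] + i*base_gap + min(i, extra) per block.
import Mathlib
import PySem

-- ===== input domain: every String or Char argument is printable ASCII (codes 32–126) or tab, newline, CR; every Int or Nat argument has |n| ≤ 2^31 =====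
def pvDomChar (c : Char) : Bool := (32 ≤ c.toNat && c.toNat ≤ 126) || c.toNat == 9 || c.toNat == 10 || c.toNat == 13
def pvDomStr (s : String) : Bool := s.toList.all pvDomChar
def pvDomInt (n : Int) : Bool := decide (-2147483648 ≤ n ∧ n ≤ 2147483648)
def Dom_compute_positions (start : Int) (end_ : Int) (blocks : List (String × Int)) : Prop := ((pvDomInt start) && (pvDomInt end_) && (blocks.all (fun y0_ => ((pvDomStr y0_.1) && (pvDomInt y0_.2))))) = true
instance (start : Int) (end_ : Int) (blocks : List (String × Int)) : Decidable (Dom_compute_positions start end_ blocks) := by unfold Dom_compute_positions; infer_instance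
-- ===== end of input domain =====

-- B replaces A's running-position accumulator by a prefix-sum array and the closed form
-- start + prefix[i] + i*base_gap + min(i, extra) per block (objective: alternative decomposition).

-- ===== PORT A =====
def compute_positions (start : Int) (end_ : Int) (blocks : List (String × Int)) : List (String × Int) :=
  let total_blocks : Int := (blocks.map (fun p => p.2)).sum
  let total_gap : Int := (end_ - start) - total_blocks
  let num_gaps : Int := (blocks.length : Int) - 1
  let base_gap : Int := if num_gaps > 0 then PySem.Int.floordiv total_gap num_gaps else 0
  let extra : Int := if num_gaps > 0 then PySem.Int.mod total_gap num_gaps else 0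
  let res := (PySem.List.enumerate blocks).foldl
    (fun (st : PySem.Dict String Int × Int) p =>
      let positions := st.1.insert p.2.1 st.2
      let pos := st.2 + p.2.2
      let pos := if p.1 < (blocks.length : Int) - 1 then pos + base_gap + (if p.1 < extra then 1 else 0) else pos
      (positions, pos))
    (PySem.Dict.empty, start)
  res.1.items

-- ===== PORT B =====
def compute_positions_alt (start : Int) (end_ : Int) (blocks : List (String × Int)) : List (String × Int) :=
  let n := blocks.length
  let widths := blocks.map (fun p => p.2)
  let total_gap : Int := (end_ - start) - widths.sum
  let base_gap : Int := if (n : Int) > 1 then PySem.Int.floordiv total_gap ((n : Int) - 1) else 0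
  let extra : Int := if (n : Int) > 1 then PySem.Int.mod total_gap ((n : Int) - 1) else 0
  let pref := widths.foldl (fun acc w => acc ++ [acc.getLastD 0 + w]) [(0 : Int)]
  ((PySem.List.enumerate (blocks.zip pref)).foldl
    (fun (d : PySem.Dict String Int) p =>
      d.insert p.2.1.1 (start + p.2.2 + p.1 * base_gap + min p.1 extra))
    PySem.Dict.empty).items

-- ===== PRECONDITION & SPEC =====
def Spec_compute_positions (start : Int) (end_ : Int) (blocks : List (String × Int)) (out : List (String × Int)) : Prop := out = compute_positions_alt start end_ blocks
instance (start : Int) (end_ : Int) (blocks : List (String × Int)) (out : List (String × Int)) : Decidable (Spec_compute_positions start end_ blocks out) := by unfold Spec_compute_positions; infer_instance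

-- ===== CLAIM (what is proved, stated in full; the proofs are below) =====
def Claim_equal_compute_positions : Prop := ∀ (start : Int) (end_ : Int) (blocks : List (String × Int)), Dom_compute_positions start end_ blocks → Spec_compute_positions start end_ blocks (compute_positions start end_ blocks)

-- ===== LEMMAS AND PROOFS =====

/-- Prefix sums `[q0, q0+w0, q0+w0+w1, …]` (the contents of B's `pref` list). -/
def psF (q0 : Int) : List Int → List Int
  | [] => [q0]
  | w :: r => q0 :: psF (q0 + w) r

lemma pref_eq (ws : List Int) : ∀ (acc : List Int) (q0 : Int),
    ws.foldl (fun acc w => acc ++ [acc.getLastD 0 + w]) (acc ++ [q0]) = acc ++ psF q0 ws := by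
  induction ws with
  | nil => intro acc q0; simp [psF]
  | cons w r ih =>
    intro acc q0
    have h : (acc ++ [q0]).getLastD 0 = q0 := by simp
    simp only [List.foldl_cons, h, psF]
    have := ih (acc ++ [q0]) (q0 + w)
    simpa using this

lemma main_loop (s bg ex N : Int) :
    ∀ (bs : List (String × Int)) (i : Int) (d : PySem.Dict String Int) (q0 pos : Int),
    i + bs.length = N →
    pos = s + q0 + i * bg + min i ex →
    ((PySem.List.enumerate bs i).foldl
      (fun (st : PySem.Dict String Int × Int) p =>
        let positions := st.1.insert p.2.1 st.2
        let pos := st.2 + p.2.2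
        let pos := if p.1 < N - 1 then pos + bg + (if p.1 < ex then 1 else 0) else pos
        (positions, pos)) (d, pos)).1
    = (PySem.List.enumerate (bs.zip (psF q0 (bs.map (fun p => p.2)))) i).foldl
        (fun (d : PySem.Dict String Int) p =>
          d.insert p.2.1.1 (s + p.2.2 + p.1 * bg + min p.1 ex)) d := by
  intro bs
  induction bs with
  | nil =>
    intro i d q0 pos _ _
    simp [PySem.List.enumerate_nil, psF]
  | cons hd rest ih =>
    intro i d q0 pos hlen hpos
    obtain ⟨nm, w⟩ := hd
    simp only [List.map_cons, psF, List.zip_cons_cons, PySem.List.enumerate_cons, List.foldl_cons]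
    rw [hpos]
    cases rest with
    | nil => simp [PySem.List.enumerate_nil, psF]
    | cons x r =>
      have hc : i < N - 1 := by
        simp only [List.length_cons] at hlen
        omega
      rw [if_pos hc]
      apply ih (i + 1) _ (q0 + w)
      · simp only [List.length_cons] at hlen ⊢; omega
      · have : min i ex + (if i < ex then (1 : Int) else 0) = min (i + 1) ex := by
          split_ifs <;> omega
        ring_nf
        ring_nf at this
        omega

-- ===== VERDICT (by name: the statement is the Claim_ definition above) =====
theorem compute_positions_spec : Claim_equal_compute_positions := by
  intro start end_ blocks _
  unfold Spec_compute_positions compute_positions compute_positions_alt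
  simp only []
  have hcond : ((blocks.length : Int) - 1 > 0) ↔ ((blocks.length : Int) > 1) := by omega
  simp only [hcond]
  have hex : 0 ≤ (if (blocks.length : Int) > 1 then PySem.Int.mod ((end_ - start) - (blocks.map (fun p => p.2)).sum) ((blocks.length : Int) - 1) else 0) := by
    split_ifs with h
    · exact PySem.Int.mod_nonneg _ (by omega)
    · exact le_refl 0
  rw [show ([(0 : Int)] : List Int) = [] ++ [(0:Int)] by simp,
      pref_eq (blocks.map (fun p => p.2)) [] 0, List.nil_append]
  congr 1
  refine main_loop start _ _ ((blocks.length : Int)) blocks 0 PySem.Dict.empty 0 start (by simp) ?_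
  rw [min_eq_left hex]; ring
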